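-- pv_equiv track=rewrite | github.com/iMGMoosic/img-main-repo | umn-files/labs/lab07/min_max_num.py | min_max_nums
-- ===== SOURCE A (Python) =====
-- def min_max_nums(string):
-- 	small_num = 0
-- 	big_num = 0
-- 	word_lst = string.split()
--
-- 	for i in range(0, len(word_lst)):
-- 		if len(word_lst[i]) < small_num or small_num == 0:
-- 			small_num = len(word_lst[i])
-- 		if len(word_lst[i]) > big_num or big_num == 0:
-- 			big_num = len(word_lst[i])
--
-- 	min_max_lst = [small_num, big_num]
-- 	return min_max_lst
-- ===== SOURCE B (Python) =====
-- def min_max_nums(string):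
-- 	lengths = sorted(len(w) for w in string.split())
-- 	if not lengths:
-- 		return [0, 0]
-- 	return [lengths[0], lengths[-1]]
-- ===== Notes on version B (the rewrite author's own statement) =====
-- stated objective: alternative
-- what changed: Replaces A's single fused min/max tracking loop (with zero-sentinel initialization) by sorting the list of word lengths and reading off the two endpoints of the sorted list.
import Mathlib
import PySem

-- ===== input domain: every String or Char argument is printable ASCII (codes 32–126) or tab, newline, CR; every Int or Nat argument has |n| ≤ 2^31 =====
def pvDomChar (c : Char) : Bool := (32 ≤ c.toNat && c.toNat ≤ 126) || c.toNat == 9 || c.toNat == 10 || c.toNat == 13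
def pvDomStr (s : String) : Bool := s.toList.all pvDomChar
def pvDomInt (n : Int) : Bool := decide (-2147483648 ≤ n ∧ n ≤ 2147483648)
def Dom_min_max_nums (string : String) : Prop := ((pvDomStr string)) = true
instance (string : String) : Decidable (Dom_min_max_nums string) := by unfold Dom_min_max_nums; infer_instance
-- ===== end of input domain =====

-- B replaces A's fused min/max tracking loop by sorting the word lengths and taking the two endpoints (alternative algorithm; O(n log n) vs O(n)).

-- ===== PORT A =====
def min_max_nums (string : String) : List Int :=
  let word_lst := PySem.Str.split₀ string
  let st := (PySem.List.pyRange 0 (PySem.List.len word_lst) 1).foldl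
    (fun (p : Int × Int) i =>
      let w := PySem.List.pyGetD word_lst i ""
      let small := if PySem.Str.len w < p.1 ∨ p.1 = 0 then PySem.Str.len w else p.1
      let big := if PySem.Str.len w > p.2 ∨ p.2 = 0 then PySem.Str.len w else p.2
      (small, big)) (0, 0)
  [st.1, st.2]

-- ===== PORT B =====
-- lengths[0] / lengths[-1] are only reached when lengths is nonempty, so pyGetD's default is never used
def min_max_nums_alt (string : String) : List Int :=
  let lengths := PySem.List.sorted ((PySem.Str.split₀ string).map (fun w => PySem.Str.len w)) (fun x => x) false
  if lengths.isEmpty then [0, 0]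
  else [PySem.List.pyGetD lengths 0 0, PySem.List.pyGetD lengths (-1) 0]

-- ===== PRECONDITION & SPEC =====
def Spec_min_max_nums (string : String) (out : List Int) : Prop := out = min_max_nums_alt string
instance (string : String) (out : List Int) : Decidable (Spec_min_max_nums string out) := by unfold Spec_min_max_nums; infer_instance

-- ===== CLAIM (what is proved, stated in full; the proofs are below) =====
def Claim_equal_min_max_nums : Prop := ∀ (string : String), Dom_min_max_nums string → Spec_min_max_nums string (min_max_nums string)

-- ===== LEMMAS AND PROOFS =====

-- every word produced by str.split() is nonempty
theorem split₀_go_ne_nil (s cur : List Char) (acc : List (List Char))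
    (hacc : ∀ w ∈ acc, w ≠ []) :
    ∀ w ∈ PySem.Chars.split₀.go s cur acc, w ≠ [] := by
  induction s generalizing cur acc with
  | nil =>
    intro w hw
    simp only [PySem.Chars.split₀.go] at hw
    split_ifs at hw with h
    · exact hacc w (List.mem_reverse.mp hw)
    · rcases List.mem_cons.mp (List.mem_reverse.mp hw) with hm | hm
      · simpa [hm] using fun hc => h (by simp [hc])
      · exact hacc w hm
  | cons c rest ih =>
    intro w hw
    simp only [PySem.Chars.split₀.go] at hw
    split_ifs at hw with h1 h2
    · exact ih [] acc hacc w hw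
    · refine ih [] (cur.reverse :: acc) ?_ w hw
      intro w' hw'
      rcases List.mem_cons.mp hw' with hm | hm
      · simp only [hm, ne_eq, List.reverse_eq_nil_iff]
        exact fun hc => h2 (by simp [hc])
      · exact hacc w' hm
    · exact ih (c :: cur) acc hacc w hw

theorem mem_split₀_len_pos (s : String) (w : String) (h : w ∈ PySem.Str.split₀ s) :
    1 ≤ PySem.Str.len w := by
  have hne : w.toList ≠ [] := by
    have hmem : w.toList ∈ PySem.Chars.split₀ s.toList := by
      rw [← PySem.Str.split₀_map_toList]
      exact List.mem_map_of_mem h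
    exact split₀_go_ne_nil s.toList [] [] (by simp) w.toList hmem
  have hpos : 0 < w.toList.length := List.length_pos_iff.mpr hne
  simp only [PySem.Str.len_eq]
  omega

-- A's tracking loop, once both trackers hold positive values, computes running min/max
theorem foldA_min_max (t : List Int) (a b : Int) (ha : 1 ≤ a) (hb : 1 ≤ b)
    (ht : ∀ x ∈ t, 1 ≤ x) :
    t.foldl (fun (p : Int × Int) x =>
      ((if x < p.1 ∨ p.1 = 0 then x else p.1), (if x > p.2 ∨ p.2 = 0 then x else p.2))) (a, b)
      = (t.foldl min a, t.foldl max b) := by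
  induction t generalizing a b with
  | nil => simp
  | cons y t ih =>
    have hy : 1 ≤ y := ht y (by simp)
    have ht' : ∀ x ∈ t, 1 ≤ x := fun x hx => ht x (by simp [hx])
    simp only [List.foldl_cons]
    rw [show ((if y < a ∨ a = 0 then y else a), (if y > b ∨ b = 0 then y else b))
        = (min a y, max b y) by
      simp only [Prod.mk.injEq]
      constructor <;> split_ifs with h <;> omega]
    exact ih (min a y) (max b y) (le_min ha hy) (le_trans hb (le_max_left b y)) ht'

-- in a pairwise-≤ list, the last element bounds every element from above
theorem last_is_max (S : List Int) (h : S.Pairwise (· ≤ ·)) (hne : S ≠ []) :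
    ∀ y ∈ S, y ≤ S.getLast hne := by
  induction S with
  | nil => simp at hne
  | cons a t ih =>
    cases t with
    | nil =>
      intro y hy
      simp only [List.mem_singleton] at hy
      simp [hy]
    | cons b s =>
      intro y hy
      have htne : (b :: s) ≠ [] := by simp
      rw [List.getLast_cons htne]
      have hpt : (b :: s).Pairwise (· ≤ ·) := (List.pairwise_cons.mp h).2
      rcases List.mem_cons.mp hy with rfl | hyt
      · exact le_trans ((List.pairwise_cons.mp h).1 _ (List.getLast_mem htne)) (le_refl _)
      · exact ih hpt htne y hyt

theorem min_max_nums_eq (string : String) :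
    min_max_nums string = min_max_nums_alt string := by
  unfold min_max_nums min_max_nums_alt
  simp only [PySem.List.len_eq]
  rw [PySem.List.foldl_pyRange_zero_pyGetD' (PySem.Str.split₀ string) ""
    (fun (p : Int × Int) w =>
      ((if PySem.Str.len w < p.1 ∨ p.1 = 0 then PySem.Str.len w else p.1),
       (if PySem.Str.len w > p.2 ∨ p.2 = 0 then PySem.Str.len w else p.2))) (0, 0)]
  rw [← List.foldl_map (f := fun w => PySem.Str.len w)
    (g := fun (p : Int × Int) x =>
      ((if x < p.1 ∨ p.1 = 0 then x else p.1), (if x > p.2 ∨ p.2 = 0 then x else p.2)))]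
  have hposL : ∀ x ∈ (PySem.Str.split₀ string).map (fun w => PySem.Str.len w), 1 ≤ x := by
    intro x hx
    rcases List.mem_map.mp hx with ⟨u, hu, rfl⟩
    exact mem_split₀_len_pos string u hu
  cases hw : (PySem.Str.split₀ string).map (fun w => PySem.Str.len w) with
  | nil => simp [PySem.List.sorted_eq_nil_iff]
  | cons x t =>
    rw [hw] at hposL
    have hS : PySem.List.sorted (x :: t) (fun x => x) false ≠ [] := by
      simp [PySem.List.sorted_eq_nil_iff]
    cases hSc : PySem.List.sorted (x :: t) (fun x => x) false with
    | nil => exact absurd hSc hS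
    | cons m s =>
      -- A's side: the fused loop computes running min / max
      have hxp : 1 ≤ x := hposL x (by simp)
      have htp : ∀ y ∈ t, 1 ≤ y := fun y hy => hposL y (by simp [hy])
      simp only [List.foldl_cons]
      rw [if_pos (Or.inr trivial), if_pos (Or.inr trivial)]
      rw [foldA_min_max t x x hxp hxp htp]
      -- B's side
      simp only [List.isEmpty_cons, if_neg Bool.false_ne_true,
        PySem.List.pyGetD_zero_cons]
      have hmsne : (m :: s) ≠ [] := by simp
      rw [PySem.List.pyGetD_neg_one (m :: s) 0 hmsne]
      -- extremal characterisations
      have hperm : (m :: s).Perm (x :: t) :=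
        hSc ▸ PySem.List.sorted_perm (x :: t) (fun x => x) false
      have hmemS : ∀ y, y ∈ m :: s ↔ y ∈ x :: t := fun y => hperm.mem_iff
      have hpw : (m :: s).Pairwise (· ≤ ·) := by
        have := PySem.List.sorted_pairwise (xs := x :: t) (key := fun x => x)
        rw [hSc] at this
        exact this
      -- min: t.foldl min x = m
      have hminA : PySem.List.min? (x :: t) (fun y => y) = some (t.foldl min x) :=
        PySem.List.min?_id_cons x t
      have hfmin_mem : t.foldl min x ∈ x :: t := PySem.List.min?_mem hminA
      have hfmin_lb : ∀ y ∈ x :: t, t.foldl min x ≤ y := PySem.List.min?_isMin hminA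
      have hm_mem : m ∈ x :: t := (hmemS m).mp (by simp)
      have hm_lb : ∀ y ∈ x :: t, m ≤ y :=
        PySem.List.key_head_sorted_le (xs := x :: t) (key := fun x => x) hSc
      have hmin : t.foldl min x = m := le_antisymm (hfmin_lb m hm_mem) (hm_lb _ hfmin_mem)
      -- max: t.foldl max x = (m :: s).getLast
      have hmaxA : PySem.List.max? (x :: t) (fun y => y) = some (t.foldl max x) :=
        PySem.List.max?_id_cons x t
      have hfmax_mem : t.foldl max x ∈ x :: t := PySem.List.max?_mem hmaxA
      have hfmax_ub : ∀ y ∈ x :: t, y ≤ t.foldl max x := PySem.List.max?_isMax hmaxA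
      have hlast_mem : (m :: s).getLast hmsne ∈ x :: t :=
        (hmemS _).mp (List.getLast_mem hmsne)
      have hlast_ub : ∀ y ∈ x :: t, y ≤ (m :: s).getLast hmsne := fun y hy =>
        last_is_max (m :: s) hpw hmsne y ((hmemS y).mpr hy)
      have hmax : t.foldl max x = (m :: s).getLast hmsne :=
        le_antisymm (hlast_ub _ hfmax_mem) (hfmax_ub _ hlast_mem)
      simp [hmin, hmax]

-- ===== VERDICT (by name: the statement is the Claim_ definition above) =====
theorem min_max_nums_spec : Claim_equal_min_max_nums := by
  intro s _
  exact min_max_nums_eq s
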